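-- pv_equiv track=rewrite | github.com/ImBharathwaj/Python_DataStructures | AsymptoticNotation/Notation13.py | func13
-- ===== SOURCE A (Python) =====
-- def func13(n):
--     m = 0
--     i = 1
--     while i <= n:
--         j = 0
--         while j <= i:
--             m += 1
--             j += 1
--         i *= 2
--     return m
-- ===== SOURCE B (Python) =====
-- def func13(n):
--     # Closed form: outer loop visits i = 2^k for k = 0..K, K = floor(log2 n);
--     # inner loop adds i + 1 each time, so total = (2^(K+1) - 1) + (K + 1) = 2^(K+1) + K.
--     if n < 1:
--         return 0
--     k = n.bit_length() - 1
--     return (1 << (k + 1)) + k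
-- ===== Notes on version B (the rewrite author's own statement) =====
-- stated objective: faster
-- what changed: Replaces the doubling-outer/linear-inner nested loops by the closed form 2^(K+1)+K with K = floor(log2 n) obtained from bit_length, returning 0 for n < 1.
import Mathlib
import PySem

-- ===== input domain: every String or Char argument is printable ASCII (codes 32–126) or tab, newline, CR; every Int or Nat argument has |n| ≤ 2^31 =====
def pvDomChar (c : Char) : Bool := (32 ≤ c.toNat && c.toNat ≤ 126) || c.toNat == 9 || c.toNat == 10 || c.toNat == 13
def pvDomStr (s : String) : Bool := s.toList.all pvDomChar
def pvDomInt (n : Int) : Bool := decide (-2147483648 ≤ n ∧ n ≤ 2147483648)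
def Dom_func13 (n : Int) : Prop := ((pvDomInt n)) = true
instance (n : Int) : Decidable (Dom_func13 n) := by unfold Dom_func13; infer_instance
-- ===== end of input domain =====

-- B replaces A's doubling-outer/linear-inner nested loops by the O(1) closed form 2^(K+1)+K, K = floor(log2 n) (0 for n < 1).


-- ===== PORT A =====
-- inner while loop: while j <= i: m += 1; j += 1
def func13Inner (i j m : Int) : Int :=
  if _h : j ≤ i then func13Inner i (j + 1) (m + 1) else m
termination_by (i + 1 - j).toNat
decreasing_by omega

-- outer while loop: while i <= n: (inner); i *= 2 — fuel only guards termination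
def func13Outer (fuel : Nat) (n i m : Int) : Int :=
  match fuel with
  | 0 => m
  | fuel + 1 => if i ≤ n then func13Outer fuel n (i * 2) (func13Inner i 0 m) else m

def func13 (n : Int) : Int := func13Outer (n.toNat + 1) n 1 0

-- ===== PORT B =====
def func13_alt (n : Int) : Int :=
  if n < 1 then 0
  else
    let k : Nat := n.toNat.log2      -- n.bit_length() - 1 for n ≥ 1
    (2 ^ (k + 1) : Int) + k

-- ===== PRECONDITION & SPEC =====
def Spec_func13 (n : Int) (out : Int) : Prop := out = func13_alt n
instance (n : Int) (out : Int) : Decidable (Spec_func13 n out) := by unfold Spec_func13; infer_instance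

-- ===== CLAIM (what is proved, stated in full; the proofs are below) =====
def Claim_equal_func13 : Prop := ∀ (n : Int), Dom_func13 n → Spec_func13 n (func13 n)

-- ===== LEMMAS AND PROOFS =====

theorem func13Inner_eq (i j m : Int) : func13Inner i j m = m + max (i + 1 - j) 0 := by
  fun_induction func13Inner i j m with
  | case1 j m h ih => rw [ih]; omega
  | case2 j m h => omega

-- mathematical form of the outer loop, indexed by the exponent k (i = 2^k)
def func13G (n : Int) (k : Nat) : Int :=
  if _h : (2 ^ k : Int) ≤ n then func13G n (k + 1) + 2 ^ k + 1 else 0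
termination_by (n + 1 - 2 ^ k).toNat
decreasing_by
  have h1 : (2 ^ k : Int) < 2 ^ (k + 1) := by
    have : (0:Int) < 2 ^ k := by positivity
    rw [pow_succ]; omega
  omega

theorem func13Outer_eq_G (fuel : Nat) (n : Int) (k : Nat) (m : Int)
    (hf : n < 2 ^ (k + fuel)) : func13Outer fuel n (2 ^ k) m = m + func13G n k := by
  induction fuel generalizing k m with
  | zero =>
    rw [Nat.add_zero] at hf
    rw [func13G]
    simp only [func13Outer]
    rw [dif_neg (by omega)]
    omega
  | succ fuel ih =>
    rw [func13G]
    simp only [func13Outer]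
    by_cases h : (2 ^ k : Int) ≤ n
    · rw [if_pos h, dif_pos h, func13Inner_eq]
      have h2 : ((2:Int) ^ k) * 2 = 2 ^ (k + 1) := by rw [pow_succ]
      have hf' : n < 2 ^ (k + 1 + fuel) := by
        have : k + (fuel + 1) = k + 1 + fuel := by omega
        rwa [this] at hf
      rw [h2, ih (k + 1) _ hf']
      have hp : (0:Int) < 2 ^ k := by positivity
      omega
    · rw [if_neg h, dif_neg h]; omega

theorem func13G_closed (n : Int) (k : Nat) (h : (2 ^ k : Int) ≤ n) :
    func13G n k = 2 ^ (n.toNat.log2 + 1) - 2 ^ k + ((n.toNat.log2 : Int) + 1 - k) := by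
  fun_induction func13G n k with
  | case1 k hk ih =>
    by_cases h2 : (2 ^ (k + 1) : Int) ≤ n
    · rw [ih h2]
      have : ((2:Int) ^ (k + 1)) = 2 ^ k * 2 := by rw [pow_succ]
      push_cast
      omega
    · -- loop ends after this iteration: 2^k ≤ n < 2^(k+1), so log2 n.toNat = k
      rw [func13G, dif_neg h2]
      have hn0 : n.toNat ≠ 0 := by
        have hp : (0:Int) < 2 ^ k := by positivity
        omega
      have hK : n.toNat.log2 = k := by
        have hlow : 2 ^ k ≤ n.toNat := by
          have : ((2 ^ k : Nat) : Int) = (2 ^ k : Int) := by push_cast; ring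
          omega
        have hhigh : n.toNat < 2 ^ (k + 1) := by
          have : ((2 ^ (k+1) : Nat) : Int) = (2 ^ (k+1) : Int) := by push_cast; ring
          omega
        have h1 : k ≤ n.toNat.log2 := (Nat.le_log2 hn0).mpr hlow
        have h2' : n.toNat.log2 < k + 1 := (Nat.log2_lt hn0).mpr hhigh
        omega
      rw [hK]
      have : ((2:Int) ^ (k + 1)) = 2 ^ k * 2 := by rw [pow_succ]
      omega
  | case2 k hk => exact absurd h hk

-- ===== VERDICT (by name: the statement is the Claim_ definition above) =====
theorem func13_spec : Claim_equal_func13 := by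
  intro n _
  unfold Spec_func13 func13 func13_alt
  by_cases hn : n < 1
  · simp only [if_pos hn]
    rcases Nat.eq_zero_or_pos n.toNat with h0 | h0
    · rw [h0]
      simp only [func13Outer]
      rw [if_neg (by omega)]
    · omega
  · rw [if_neg hn]
    have h1 : (1 : Int) = 2 ^ (0 : Nat) := by norm_num
    have hfuel : n < 2 ^ (0 + (n.toNat + 1)) := by
      have := Nat.lt_two_pow_self (n := n.toNat)
      have hc : ((2 ^ n.toNat : Nat) : Int) = (2 ^ n.toNat : Int) := by push_cast; ring
      have : (2 ^ n.toNat : Int) ≤ 2 ^ (0 + (n.toNat + 1)) := by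
        apply pow_le_pow_right₀ <;> omega
      omega
    rw [h1, func13Outer_eq_G _ _ _ _ hfuel,
        func13G_closed n 0 (by norm_num; omega)]
    norm_num
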